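-- pv_equiv track=rewrite | github.com/raabmarie/long-term_field_trial_westerfeld | transformation/19_bacteria_species.py | is_code
-- ===== SOURCE A (Python) =====
-- def is_code(name):
--     if "-" in name:  # There is a minus sign anywhere -> code
--         return True
--     if any(ele.isnumeric() for ele in name):  # number digits? -> code
--         return True
--     wordlist = name.split(" ")
--     for word in wordlist:  # check  upper case
--         if any(ele.isupper() for ele in word[1:]):  # second letter caps -> code
--             return True  # We assume it is code
--     return False  # Maybe latin?
-- ===== SOURCE B (Python) =====
-- def is_code(name):
--     at_word_start = True
--     for ch in name:
--         if ch == "-" or ch.isnumeric():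
--             return True
--         if ch.isupper() and not at_word_start:
--             return True
--         at_word_start = (ch == " ")
--     return False
-- ===== Notes on version B (the rewrite author's own statement) =====
-- stated objective: simpler
-- what changed: B replaces A's substring test + whole-string numeric scan + split-into-words with three passes by a single left-to-right character scan that carries one boolean at_word_start (true at index 0 and right after each space), so the word list and word[1:] slices disappear.
import Mathlib
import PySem

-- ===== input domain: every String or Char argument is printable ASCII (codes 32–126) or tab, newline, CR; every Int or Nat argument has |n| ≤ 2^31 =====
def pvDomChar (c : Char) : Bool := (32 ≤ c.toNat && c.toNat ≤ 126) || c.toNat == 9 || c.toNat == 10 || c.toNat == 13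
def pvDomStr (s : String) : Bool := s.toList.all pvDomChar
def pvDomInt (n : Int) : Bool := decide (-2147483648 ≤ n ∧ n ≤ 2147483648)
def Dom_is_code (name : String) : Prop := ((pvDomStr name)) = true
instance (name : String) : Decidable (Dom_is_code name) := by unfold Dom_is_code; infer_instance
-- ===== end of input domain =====

-- ===== PORT A =====
-- B is a single character scan replacing A's three passes (substring test, digit scan, split into words); same value, no word list.
-- (In A, '.isnumeric()' is ported as PySem.Chars.isdigit, exact on the ASCII input domain.)
def is_code (name : String) : Bool :=
  if PySem.Chars.isIn ['-'] name.toList then true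
  else if name.toList.any (fun ele => PySem.Chars.isdigit ele) then true
  else if (PySem.Chars.splitOn name.toList [' ']).any
      (fun word => (word.drop 1).any (fun ele => PySem.Chars.isupper ele)) then true
  else false

-- ===== PORT B =====
-- one pass; atStart is true at index 0 and right after every space
def isCodeScan : Bool → List Char → Bool
  | _, [] => false
  | atStart, c :: rest =>
    if c == '-' || PySem.Chars.isdigit c then true
    else if PySem.Chars.isupper c && !atStart then true
    else isCodeScan (c == ' ') rest

def is_code_alt (name : String) : Bool := isCodeScan true name.toList

-- ===== PRECONDITION & SPEC =====
def Spec_is_code (name : String) (out : Bool) : Prop := out = is_code_alt name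
instance (name : String) (out : Bool) : Decidable (Spec_is_code name out) := by unfold Spec_is_code; infer_instance

-- ===== CLAIM (what is proved, stated in full; the proofs are below) =====
def Claim_equal_is_code : Prop := ∀ (name : String), Dom_is_code name → Spec_is_code name (is_code name)

-- ===== LEMMAS AND PROOFS =====

-- the "uppercase not at a word start" part of both programs, as a state machine over the characters
def upp : Bool → List Char → Bool
  | _, [] => false
  | st, c :: rest => (PySem.Chars.isupper c && !st) || upp (c == ' ') rest

-- B's scan is the dash/digit scan OR-ed with the uppercase state machine
theorem scan_eq (l : List Char) (st : Bool) :
    isCodeScan st l = (l.any (fun c => c == '-' || PySem.Chars.isdigit c) || upp st l) := by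
  induction l generalizing st with
  | nil => rfl
  | cons c rest ih =>
      simp only [isCodeScan, upp, List.any_cons, ih]
      by_cases h1 : (c == '-' || PySem.Chars.isdigit c) = true <;>
      by_cases h2 : (PySem.Chars.isupper c && !st) = true <;>
      simp [h1, h2]

-- A's split-then-scan equals the state machine: invariant of splitOn.go
-- (acc holds finished words, cur the reversed current word; cur.isEmpty is B's atStart)
theorem go_any (fuel : Nat) : ∀ (l cur : List Char) (acc : List (List Char)), l.length < fuel →
    (PySem.Chars.splitOn.go [' '] fuel l cur acc).any (fun w => (w.drop 1).any PySem.Chars.isupper)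
      = (acc.any (fun w => (w.drop 1).any PySem.Chars.isupper)
          || cur.dropLast.any PySem.Chars.isupper || upp cur.isEmpty l) := by
  induction fuel with
  | zero => intro l cur acc h; omega
  | succ fuel ih =>
      intro l cur acc h
      cases l with
      | nil =>
          rw [PySem.Chars.splitOn.go]
          · simp [upp, List.drop_one, List.tail_reverse, Bool.or_comm]
          · omega
      | cons c rest =>
          rw [PySem.Chars.splitOn.go]
          by_cases hc : c = ' '
          · subst hc
            simp only [List.isPrefixOf, beq_self_eq_true, Bool.true_and, if_pos]
            rw [ih _ _ _ (by simpa using Nat.lt_of_succ_lt_succ h)]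
            simp [upp, List.drop_one, List.tail_reverse, Bool.or_comm,
              show PySem.Chars.isupper ' ' = false from rfl]
          · have hp : ([' '].isPrefixOf (c :: rest)) = false := by
              simp [List.isPrefixOf, Ne.symm hc]
            rw [if_neg (by simp [hp])]
            rw [ih _ _ _ (by simpa using Nat.lt_of_succ_lt_succ h)]
            simp only [upp, show (c == ' ') = false from by simp [hc]]
            cases cur <;> simp [Bool.or_comm, Bool.or_left_comm, Bool.or_assoc]

theorem splitOn_any (l : List Char) :
    (PySem.Chars.splitOn l [' ']).any (fun w => (w.drop 1).any PySem.Chars.isupper) = upp true l := by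
  rw [PySem.Chars.splitOn, go_any (l.length + 1) l [] [] (by omega)]
  rfl

theorem main_eq (l : List Char) :
    (if PySem.Chars.isIn ['-'] l then true
     else if l.any (fun ele => PySem.Chars.isdigit ele) then true
     else if (PySem.Chars.splitOn l [' ']).any
         (fun word => (word.drop 1).any (fun ele => PySem.Chars.isupper ele)) then true
     else false) = isCodeScan true l := by
  rw [scan_eq, splitOn_any]
  by_cases hm : '-' ∈ l
  · have h1 : PySem.Chars.isIn ['-'] l = true :=
      (PySem.Chars.isIn_iff_infix _ _).mpr ((List.singleton_infix_iff _ _).mpr hm)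
    have h2 : l.any (fun c => c == '-' || PySem.Chars.isdigit c) = true := by
      simp only [List.any_eq_true]
      exact ⟨'-', hm, by simp⟩
    simp [h1, h2]
  · have h1 : PySem.Chars.isIn ['-'] l = false := by
      rw [PySem.Chars.isIn_eq_false_iff]
      exact fun h => hm ((List.singleton_infix_iff _ _).mp h)
    by_cases hd : (l.any fun ele => PySem.Chars.isdigit ele) = true
    · have h2 : l.any (fun c => c == '-' || PySem.Chars.isdigit c) = true := by
        simp only [List.any_eq_true] at hd ⊢
        obtain ⟨c, hc, hdig⟩ := hd
        exact ⟨c, hc, by simp [hdig]⟩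
      simp [h1, hd, h2]
    · have hd' : (l.any fun ele => PySem.Chars.isdigit ele) = false := by simpa using hd
      have h2 : l.any (fun c => c == '-' || PySem.Chars.isdigit c) = false := by
        rw [List.any_eq_false]
        intro c hc
        simp only [Bool.or_eq_true, not_or, beq_iff_eq]
        refine ⟨fun h => hm (h ▸ hc), ?_⟩
        simpa using List.any_eq_false.mp hd' c hc
      simp [h1, hd', h2]
-- ===== VERDICT (by name: the statement is the Claim_ definition above) =====
theorem is_code_spec : Claim_equal_is_code := by
  intro name _
  unfold Spec_is_code is_code is_code_alt
  exact main_eq name.toList
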